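-- pv_equiv track=rewrite | github.com/AdriQD/OutOfDistribution-CSDNN | data generation.py | whichrows
-- ===== SOURCE A (Python) =====
-- def ternary (n):
--
-- 	if n == 0:
-- 		return [0,0,0,0]
-- 	nums = []
-- 	while n:
-- 		n, r = divmod(n, 3)
-- 		nums.append(str(r))
-- 	ter=''.join(reversed(nums))
-- 	list_ter=[int(x) for x in ter[0:]]
-- 	size=len(list_ter)
-- 	moresize=[0]*(4-size)
-- 	return moresize+list_ter
--
-- def whichrows(i1,i2,i3,i4):
-- 	i1=i1-1; i2=i2-1; i3= i3-1; i4=i4-1  ##now zero, namely the identity, corresponds to -1.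
-- 	rows=[]
-- 	for i in range (0,81):
-- 		ter=ternary(i)
-- 		if i1==-1 or i1==ter[0]:
-- 			if i2==-1 or i2==ter[1]:
-- 				if i3==-1 or i3==ter[2]:
-- 					if i4==-1 or i4==ter[3]:
-- 						rows=rows+[i]
-- 	return rows
-- ===== SOURCE B (Python) =====
-- def whichrows(i1, i2, i3, i4):
--     # per-position allowed digit sets, then directly enumerate matching rows (ascending)
--     def digits(i):
--         v = i - 1
--         if v == -1:
--             return [0, 1, 2]
--         if v in (0, 1, 2):
--             return [v]
--         return []
--     rows = []
--     for d0 in digits(i1):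
--         for d1 in digits(i2):
--             for d2 in digits(i3):
--                 for d3 in digits(i4):
--                     rows.append(d0 * 27 + d1 * 9 + d2 * 3 + d3)
--     return rows
-- ===== Notes on version B (the rewrite author's own statement) =====
-- stated objective: simpler
-- what changed: Replaces the scan of all 81 numbers (each converted to ternary via a string-building helper) by computing each position's allowed digit set and directly enumerating only the matching rows with four nested loops, most-significant digit first so the output stays ascending.
import Mathlib
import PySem

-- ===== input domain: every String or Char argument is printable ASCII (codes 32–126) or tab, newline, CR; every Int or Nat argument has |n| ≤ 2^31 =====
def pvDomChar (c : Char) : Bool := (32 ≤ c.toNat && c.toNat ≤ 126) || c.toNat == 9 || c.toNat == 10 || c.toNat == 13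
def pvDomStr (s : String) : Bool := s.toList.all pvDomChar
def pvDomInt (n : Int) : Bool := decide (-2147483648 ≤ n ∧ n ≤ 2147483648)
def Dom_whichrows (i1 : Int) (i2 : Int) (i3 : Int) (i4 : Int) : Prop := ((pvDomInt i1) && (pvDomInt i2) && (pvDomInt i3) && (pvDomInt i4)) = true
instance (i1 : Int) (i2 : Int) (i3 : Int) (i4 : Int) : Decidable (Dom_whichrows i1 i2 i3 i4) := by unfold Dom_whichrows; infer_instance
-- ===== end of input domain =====

-- B replaces the 81-number scan through a ternary string helper by directly enumerating
-- the matching rows from per-position allowed digit sets (objective: simpler).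


-- ===== PORT A =====
-- 'while n: n, r = divmod(n, 3); nums.append(str(r))'.  The loop is only ever entered with
-- n > 0 (whichrows passes 0 ≤ i < 81 and n = 0 is handled before the loop), so the guard is
-- written 0 < n to make the recursion total; on those inputs it is Python's 'while n'.
def ternaryLoop : Nat → Int → List String → List String
  | 0, _, nums => nums
  | fuel + 1, n, nums =>
    if 0 < n then
      ternaryLoop fuel (PySem.Int.floordiv n 3) (nums ++ [PySem.Int.toStr (PySem.Int.mod n 3)])
    else nums

def ternary (n : Int) : List Int :=
  if n = 0 then [0, 0, 0, 0]
  else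
    -- fuel n.toNat is enough: n strictly decreases while positive (n // 3 < n for n ≥ 1)
    let nums := ternaryLoop n.toNat n []
    let ter := PySem.Str.join "" nums.reverse            -- ''.join(reversed(nums))
    -- [int(x) for x in ter]; every character is a digit here, so ofStr? is always some
    let list_ter := ter.toList.map (fun c => (PySem.Int.ofStr? (String.ofList [c])).getD 0)
    let size : Int := list_ter.length
    let moresize := List.replicate (4 - size).toNat (0 : Int)   -- [0]*(4-size)
    moresize ++ list_ter

-- loop body of 'for i in range(0, 81)': the four nested ifs ('ter[k]' is always in range here)
def wrBody (j1 j2 j3 j4 : Int) (rows : List Int) (i : Int) : List Int :=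
  let ter := ternary i
  if j1 = -1 ∨ PySem.List.pyGet? ter 0 = some j1 then
    if j2 = -1 ∨ PySem.List.pyGet? ter 1 = some j2 then
      if j3 = -1 ∨ PySem.List.pyGet? ter 2 = some j3 then
        if j4 = -1 ∨ PySem.List.pyGet? ter 3 = some j4 then rows ++ [i]
        else rows
      else rows
    else rows
  else rows

def whichrows (i1 : Int) (i2 : Int) (i3 : Int) (i4 : Int) : List Int :=
  (PySem.List.pyRange 0 81 1).foldl (wrBody (i1 - 1) (i2 - 1) (i3 - 1) (i4 - 1)) []

-- ===== PORT B =====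
def altDigits (i : Int) : List Int :=
  let v := i - 1
  if v = -1 then [0, 1, 2]
  else if v = 0 ∨ v = 1 ∨ v = 2 then [v]
  else []

def whichrows_alt (i1 : Int) (i2 : Int) (i3 : Int) (i4 : Int) : List Int :=
  (altDigits i1).foldl (fun rows d0 =>
    (altDigits i2).foldl (fun rows d1 =>
      (altDigits i3).foldl (fun rows d2 =>
        (altDigits i4).foldl (fun rows d3 =>
          rows ++ [d0 * 27 + d1 * 9 + d2 * 3 + d3]) rows) rows) rows) []

-- ===== PRECONDITION & SPEC =====
def Spec_whichrows (i1 : Int) (i2 : Int) (i3 : Int) (i4 : Int) (out : List Int) : Prop := out = whichrows_alt i1 i2 i3 i4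
instance (i1 : Int) (i2 : Int) (i3 : Int) (i4 : Int) (out : List Int) : Decidable (Spec_whichrows i1 i2 i3 i4 out) := by unfold Spec_whichrows; infer_instance

-- ===== CLAIM (what is proved, stated in full; the proofs are below) =====
def Claim_equal_whichrows : Prop := ∀ (i1 : Int) (i2 : Int) (i3 : Int) (i4 : Int), Dom_whichrows i1 i2 i3 i4 → Spec_whichrows i1 i2 i3 i4 (whichrows i1 i2 i3 i4)

-- ===== LEMMAS AND PROOFS =====

-- both programs depend on each argument only through its class: 0 (wildcard), 1, 2, 3 (fixed digit), anything else (no match)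
def nrm (i : Int) : Int := if 0 ≤ i ∧ i ≤ 3 then i else 4

lemma nrm_mem (i : Int) : nrm i ∈ ([0, 1, 2, 3, 4] : List Int) := by
  unfold nrm; split_ifs with h
  · simp only [List.mem_cons, List.not_mem_nil, or_false]; omega
  · simp

lemma altDigits_nrm (i : Int) : altDigits (nrm i) = altDigits i := by
  by_cases h : 0 ≤ i ∧ i ≤ 3
  · have hi : nrm i = i := by unfold nrm; rw [if_pos h]
    rw [hi]
  · have h4 : nrm i = 4 := by unfold nrm; rw [if_neg h]
    have e4 : altDigits 4 = [] := by decide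
    have ei : altDigits i = [] := by
      unfold altDigits
      rw [if_neg (by omega), if_neg (by omega)]
    rw [h4, e4, ei]

lemma alt_nrm (i1 i2 i3 i4 : Int) :
    whichrows_alt (nrm i1) (nrm i2) (nrm i3) (nrm i4) = whichrows_alt i1 i2 i3 i4 := by
  unfold whichrows_alt
  rw [altDigits_nrm i1, altDigits_nrm i2, altDigits_nrm i3, altDigits_nrm i4]

lemma terBounds : (PySem.List.pyRange 0 81 1).all
    (fun i => (ternary i).length == 4 &&
      (ternary i).all (fun d => decide (0 ≤ d ∧ d ≤ 2))) = true := by decide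

lemma cond_nrm (i d : Int) (hd : 0 ≤ d ∧ d ≤ 2) :
    (nrm i - 1 = -1 ∨ (d : Int) = nrm i - 1) ↔ (i - 1 = -1 ∨ d = i - 1) := by
  unfold nrm; split_ifs <;> omega

lemma wrBody_nrm (i1 i2 i3 i4 : Int) (rows : List Int) (x : Int)
    (hx : x ∈ PySem.List.pyRange 0 81 1) :
    wrBody (nrm i1 - 1) (nrm i2 - 1) (nrm i3 - 1) (nrm i4 - 1) rows x
      = wrBody (i1 - 1) (i2 - 1) (i3 - 1) (i4 - 1) rows x := by
  have hb := List.all_eq_true.mp terBounds x hx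
  simp only [Bool.and_eq_true, beq_iff_eq, List.all_eq_true, decide_eq_true_eq] at hb
  obtain ⟨hlen, hdig⟩ := hb
  match hter : ternary x, hlen with
  | [a, b, c, d], _ =>
    have ha := hdig a (by rw [hter]; simp)
    have hb2 := hdig b (by rw [hter]; simp)
    have hc := hdig c (by rw [hter]; simp)
    have hd := hdig d (by rw [hter]; simp)
    have pg0 : PySem.List.pyGet? [a, b, c, d] (0 : Int) = some a := by
      simp [PySem.List.pyGet?, PySem.List.pyIdx?]
    have pg1 : PySem.List.pyGet? [a, b, c, d] (1 : Int) = some b := by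
      simp [PySem.List.pyGet?, PySem.List.pyIdx?]
    have pg2 : PySem.List.pyGet? [a, b, c, d] (2 : Int) = some c := by
      simp [PySem.List.pyGet?, PySem.List.pyIdx?]
    have pg3 : PySem.List.pyGet? [a, b, c, d] (3 : Int) = some d := by
      simp [PySem.List.pyGet?, PySem.List.pyIdx?]
    unfold wrBody
    rw [hter]
    simp only [pg0, pg1, pg2, pg3, Option.some_inj]
    rw [if_congr (cond_nrm i1 a ha) rfl rfl, if_congr (cond_nrm i2 b hb2) rfl rfl,
        if_congr (cond_nrm i3 c hc) rfl rfl, if_congr (cond_nrm i4 d hd) rfl rfl]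

lemma wr_nrm (i1 i2 i3 i4 : Int) :
    whichrows (nrm i1) (nrm i2) (nrm i3) (nrm i4) = whichrows i1 i2 i3 i4 := by
  unfold whichrows
  apply PySem.List.foldl_congr_mem
  intro rows x hx
  exact wrBody_nrm i1 i2 i3 i4 rows x hx

set_option maxRecDepth 100000 in
lemma master : ∀ a ∈ ([0, 1, 2, 3, 4] : List Int), ∀ b ∈ ([0, 1, 2, 3, 4] : List Int),
    ∀ c ∈ ([0, 1, 2, 3, 4] : List Int), ∀ d ∈ ([0, 1, 2, 3, 4] : List Int),
    whichrows a b c d = whichrows_alt a b c d := by decide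

-- ===== VERDICT (by name: the statement is the Claim_ definition above) =====
theorem whichrows_spec : Claim_equal_whichrows := by
  intro i1 i2 i3 i4 _
  unfold Spec_whichrows
  rw [← wr_nrm i1 i2 i3 i4, ← alt_nrm i1 i2 i3 i4]
  exact master _ (nrm_mem i1) _ (nrm_mem i2) _ (nrm_mem i3) _ (nrm_mem i4)
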